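-- pv_equiv track=rewrite | github.com/danielcoblentz/Competitive-programming | 2022 problems/2022Problem3.py | find_min_combo
-- ===== SOURCE A (Python) =====
-- SCORES = [2,3,6,7,8]
--
-- def find_min_combo(total):
--     # dynamic programming to find the combo (multiset) with minimal number of plays
--     # dp[t] = (min_num_plays, combo_list_as_counts)
--     INF = 10**9
--     maxT = total
--     # dp_num[t] minimal plays, dp_choice[t] last score used index
--     dp_num = [INF] * (maxT+1)
--     dp_choice = [-1] * (maxT+1)
--     dp_num[0] = 0
--     # dp_num[t] = minimal number of plays to reach t
--     # dp_combo[t] = lexicographically smallest tuple (sorted ascending) achieving dp_num[t]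
--     dp_combo = [None] * (maxT+1)
--     dp_num[0] = 0
--     dp_combo[0] = tuple()
--     for s in sorted(SCORES):
--         for t in range(s, maxT+1):
--             if dp_num[t-s] >= INF:
--                 continue
--             cand_num = dp_num[t-s] + 1
--             # candidate combo: merge dp_combo[t-s] with s and keep sorted tuple
--             prev = dp_combo[t-s]
--             cand_combo = tuple(sorted(prev + (s,)))
--             if cand_num < dp_num[t]:
--                 dp_num[t] = cand_num
--                 dp_combo[t] = cand_combo
--             elif cand_num == dp_num[t]:
--                 # tie: choose lexicographically smaller multiset
--                 if dp_combo[t] is None or cand_combo < dp_combo[t]: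
--                     dp_combo[t] = cand_combo
--     if dp_num[total] >= INF:
--         return None
--     return list(dp_combo[total])
-- ===== SOURCE B (Python) =====
-- SCORES = [2, 3, 6, 7, 8]
--
-- def find_min_combo(total):
--     # Min-count coin DP over plain ints, then greedy smallest-first reconstruction.
--     cnt = {0: 0}
--     for t in range(1, total + 1):
--         best = None
--         for s in SCORES:
--             if s <= t and (t - s) in cnt:
--                 c = cnt[t - s] + 1
--                 if best is None or c < best:
--                     best = c
--         if best is not None:
--             cnt[t] = best
--     n = cnt.get(total)
--     if n is None:
--         return None
--     combo = []
--     t = total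
--     while n > 0:
--         pick = None
--         for s in SCORES:
--             if s <= t and cnt.get(t - s) == n - 1:
--                 pick = s
--                 break
--         if pick is None:
--             break
--         combo.append(pick)
--         t -= pick
--         n -= 1
--     return combo
-- ===== Notes on version B (the rewrite author's own statement) =====
-- stated objective: faster
-- what changed: A runs a coin-major DP that stores and re-sorts a full combo tuple at every cell (quadratic work); B computes only the integer minimal play count per total in one pass and then reconstructs the lexicographically smallest minimal combo greedily, always taking the smallest score whose remainder still needs exactly one play fewer.
-- outside the precondition, e.g. on find_min_combo(-1): A raises IndexError, B returns None
import Mathlib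
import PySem

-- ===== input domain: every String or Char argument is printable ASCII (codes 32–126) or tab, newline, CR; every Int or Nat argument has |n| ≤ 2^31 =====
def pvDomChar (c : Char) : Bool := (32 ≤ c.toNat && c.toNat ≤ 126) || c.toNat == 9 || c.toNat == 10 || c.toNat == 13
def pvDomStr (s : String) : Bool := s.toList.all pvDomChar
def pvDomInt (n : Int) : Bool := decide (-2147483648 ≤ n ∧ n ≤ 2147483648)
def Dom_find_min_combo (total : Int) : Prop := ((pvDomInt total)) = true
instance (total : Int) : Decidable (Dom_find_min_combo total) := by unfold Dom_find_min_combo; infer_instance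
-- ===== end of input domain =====

-- B replaces A's quadratic tuple-carrying DP by an O(total) integer min-count DP plus a greedy
-- smallest-coin-first reconstruction of the lexicographically smallest minimal combo (objective: faster).

-- ===== PORT A =====
def pvINF : Int := 10 ^ 9

-- Python tuple '<' on integer tuples (lexicographic); exact for int entries
def pvLexLt : List Int → List Int → Bool
  | _, [] => false
  | [], _ :: _ => true
  | a :: as, b :: bs => decide (a < b) || (a == b && pvLexLt as bs)

-- body of A's inner 'for t in range(s, maxT+1)' loop over the state (dp_num, dp_combo)
def pvBodyA (s : Int) (st : List Int × List (Option (List Int))) (t : Int) :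
    List Int × List (Option (List Int)) :=
  let dpNum := st.1
  let dpCombo := st.2
  let v := PySem.List.pyGetD dpNum (t - s) 0        -- dp_num[t-s]; in range whenever Python does not raise
  if v ≥ pvINF then st                              -- 'continue'
  else
    let candNum := v + 1
    match PySem.List.pyGetD dpCombo (t - s) none with
    | none => st      -- Python would raise TypeError (None + tuple); unreachable when dp_num[t-s] < INF
    | some prev =>
      -- `tuple(sorted(prev + (s,)))`: prev is a sorted tuple wherever Python reaches this
      -- line (dp_combo entries are sorted, an invariant of the proof below: every stored combo
      -- is a pvRep, hence Pairwise (≤)), so Python's sorted call is exactly the ordered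
      -- insertion of s into prev; PySem.List.sorted itself (insertion sort, O(n²) per call)
      -- would make the quadratic table walk infeasible to evaluate, with the same value.
      let candCombo := List.orderedInsert (· ≤ ·) s prev
      let curNum := PySem.List.pyGetD dpNum t 0
      if candNum < curNum then
        (PySem.List.pySetD dpNum t candNum, PySem.List.pySetD dpCombo t (some candCombo))
      else if candNum == curNum then
        match PySem.List.pyGetD dpCombo t none with
        | none => (dpNum, PySem.List.pySetD dpCombo t (some candCombo))
        | some cur =>
          if pvLexLt candCombo cur then (dpNum, PySem.List.pySetD dpCombo t (some candCombo))
          else st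
      else st

def find_min_combo (total : Int) : Option (List Int) :=
  let maxT := total
  let dpNum0 : List Int := List.replicate (maxT + 1).toNat pvINF
  let _dpChoice : List Int := List.replicate (maxT + 1).toNat (-1)   -- dp_choice: written once, never read
  let dpNum1 := PySem.List.pySetD dpNum0 0 0
  let dpCombo0 : List (Option (List Int)) := List.replicate (maxT + 1).toNat none
  let dpCombo1 := PySem.List.pySetD dpCombo0 0 (some [])
  let final := (PySem.List.sorted ([2, 3, 6, 7, 8] : List Int) (fun x => x) false).foldl
    (fun st s => (PySem.List.pyRange s (maxT + 1) 1).foldl (pvBodyA s) st) (dpNum1, dpCombo1)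
  if PySem.List.pyGetD final.1 total 0 ≥ pvINF then none
  else PySem.List.pyGetD final.2 total none

-- ===== PORT B =====
-- one step of B's 'for s in SCORES' best-candidate scan
def pvBestStep (cnt : PySem.Dict Int Int) (t : Int) (best : Option Int) (s : Int) : Option Int :=
  if decide (s ≤ t) && PySem.Dict.contains cnt (t - s) then
    let c := PySem.Dict.getD cnt (t - s) 0 + 1
    match best with
    | none => some c
    | some b => if c < b then some c else some b
  else best

-- B's reconstruction loop; one play per iteration, n plays in total (fuel = n)
def pvGreedy (cnt : PySem.Dict Int Int) : Nat → Int → Int → List Int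
  | 0, _, _ => []
  | Nat.succ k, t, n =>
    match List.find? (fun s => decide (s ≤ t) && (PySem.Dict.get? cnt (t - s) == some (n - 1)))
        ([2, 3, 6, 7, 8] : List Int) with
    | none => []        -- B's 'break' guard; unreachable when cnt is the min-count table
    | some s => s :: pvGreedy cnt k (t - s) (n - 1)

def find_min_combo_alt (total : Int) : Option (List Int) :=
  let cnt0 : PySem.Dict Int Int := PySem.Dict.ofList [(0, 0)]
  let cnt := (PySem.List.pyRange 1 (total + 1) 1).foldl
    (fun cnt t =>
      match ([2, 3, 6, 7, 8] : List Int).foldl (pvBestStep cnt t) none with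
      | none => cnt
      | some b => PySem.Dict.insert cnt t b) cnt0
  match PySem.Dict.get? cnt total with
  | none => none
  | some n => some (pvGreedy cnt n.toNat total n)

-- ===== PRECONDITION & SPEC =====
-- Pre_ excludes total < 0, where A raises IndexError, and total ≥ 2·10⁹, where A's INF = 10⁹
-- sentinel is reached by genuine play counts (a pure-2s combo needs 10⁹ plays), so A's
-- 'dp_num[t-s] >= INF' test no longer means 'unreachable' and its intermediate tables derail.
def Pre_find_min_combo (total : Int) : Prop := 0 ≤ total ∧ total < 2 * 10 ^ 9
instance (total : Int) : Decidable (Pre_find_min_combo total) := by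
  unfold Pre_find_min_combo; infer_instance

def pvWitness_find_min_combo : Int := 12

def Spec_find_min_combo (total : Int) (out : Option (List Int)) : Prop := out = find_min_combo_alt total
instance (total : Int) (out : Option (List Int)) : Decidable (Spec_find_min_combo total out) := by
  unfold Spec_find_min_combo; infer_instance

-- ===== CLAIM (what is proved, stated in full; the proofs are below) =====
def Claim_equal_find_min_combo : Prop := ∀ (total : Int), Dom_find_min_combo total →
  Pre_find_min_combo total → Spec_find_min_combo total (find_min_combo total)

-- ===== LEMMAS AND PROOFS =====

-- ---------- shared abstract layer: the (count, lex) order on combos ----------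
def pvKeyLtb (c d : List Int) : Bool :=
  decide (c.length < d.length) || (c.length == d.length && pvLexLt c d)
def pvKeyLt (c d : List Int) : Prop := pvKeyLtb c d = true
def pvKeyLe (c d : List Int) : Prop := pvKeyLt c d ∨ c = d

def pvIns (s : Int) (c : List Int) : List Int := List.orderedInsert (· ≤ ·) s c

-- multisets of scores summing to t, as sorted lists
def pvRep (S : List Int) (t : Nat) (c : List Int) : Prop :=
  List.Pairwise (· ≤ ·) c ∧ (∀ x ∈ c, x ∈ S) ∧ c.sum = (t : Int)

-- 'o is the (count, lex)-minimum over pvRep S t, or none if there is no representation'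
def pvIsBest (S : List Int) (t : Nat) : Option (List Int) → Prop
  | none => ∀ c, ¬ pvRep S t c
  | some c => pvRep S t c ∧ ∀ d, pvRep S t d → pvKeyLe c d

-- ---------- abstract form of A: staged (coin-major) DP ----------
def pvChoose (old : Option (List Int)) (cand : List Int) : Option (List Int) :=
  match old with
  | none => some cand
  | some o => if pvKeyLtb cand o then some cand else some o

def pvStage (s : Nat) (h : Nat → Option (List Int)) : Nat → Option (List Int)
  | t =>
    if t < s ∨ s = 0 then h t
    else
      match pvStage s h (t - s) with
      | none => h t
      | some p => pvChoose (h t) (pvIns (s : Int) p)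
  termination_by t => t
  decreasing_by omega

def pvBase : Nat → Option (List Int) := fun t => if t = 0 then some [] else none
def pvG1 : Nat → Option (List Int) := pvStage 2 pvBase
def pvG2 : Nat → Option (List Int) := pvStage 3 pvG1
def pvG3 : Nat → Option (List Int) := pvStage 6 pvG2
def pvG4 : Nat → Option (List Int) := pvStage 7 pvG3
def pvG5 : Nat → Option (List Int) := pvStage 8 pvG4

-- ---------- abstract form of B: min-count DP and greedy reconstruction ----------
def pvCombine (acc : Option Nat) : Option Nat → Option Nat
  | none => acc
  | some m =>
    match acc with
    | none => some (m + 1)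
    | some b => if m + 1 < b then some (m + 1) else some b

def pvCnt : Nat → Option Nat
  | t =>
    if t = 0 then some 0
    else
      pvCombine (pvCombine (pvCombine (pvCombine (pvCombine none
        (if 2 ≤ t then pvCnt (t - 2) else none))
        (if 3 ≤ t then pvCnt (t - 3) else none))
        (if 6 ≤ t then pvCnt (t - 6) else none))
        (if 7 ≤ t then pvCnt (t - 7) else none))
        (if 8 ≤ t then pvCnt (t - 8) else none)
  termination_by t => t
  decreasing_by all_goals omega

def pvGreedyF : Nat → Nat → List Int
  | 0, _ => []
  | Nat.succ k, t =>
    match List.find? (fun s => decide (s ≤ t) && (pvCnt (t - s) == some k)) [2, 3, 6, 7, 8] with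
    | none => []
    | some s => (s : Int) :: pvGreedyF k (t - s)

def pvAllS : List Int := [2, 3, 6, 7, 8]

-- ---------- order lemmas ----------
theorem pvLexLt_irrefl (c : List Int) : pvLexLt c c = false := by
  induction c with
  | nil => rfl
  | cons a as ih => simp [pvLexLt, ih]
theorem pvLexLt_trichot (c d : List Int) : pvLexLt c d = true ∨ c = d ∨ pvLexLt d c = true := by
  induction c generalizing d with
  | nil =>
    cases d with
    | nil => exact Or.inr (Or.inl rfl)
    | cons b bs => exact Or.inl rfl
  | cons a as ih =>
    cases d with
    | nil => exact Or.inr (Or.inr rfl)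
    | cons b bs =>
      rcases lt_trichotomy a b with h | h | h
      · exact Or.inl (by simp [pvLexLt, h])
      · subst h
        rcases ih bs with h2 | h2 | h2
        · exact Or.inl (by simp [pvLexLt, h2])
        · exact Or.inr (Or.inl (by rw [h2]))
        · exact Or.inr (Or.inr (by simp [pvLexLt, h2]))
      · exact Or.inr (Or.inr (by simp [pvLexLt, h]))
theorem pvLexLt_trans {c d e : List Int} (h1 : pvLexLt c d = true) (h2 : pvLexLt d e = true) :
    pvLexLt c e = true := by
  induction c generalizing d e with
  | nil =>
    cases e with
    | nil =>
      cases d with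
      | nil => simp [pvLexLt] at h1
      | cons b bs => simp [pvLexLt] at h2
    | cons x xs => rfl
  | cons a as ih =>
    cases d with
    | nil => simp [pvLexLt] at h1
    | cons b bs =>
      cases e with
      | nil => simp [pvLexLt] at h2
      | cons x xs =>
        simp only [pvLexLt, Bool.or_eq_true, Bool.and_eq_true, decide_eq_true_eq,
          beq_iff_eq] at h1 h2 ⊢
        rcases h1 with h1 | ⟨rfl, h1⟩ <;> rcases h2 with h2 | ⟨rfl, h2⟩
        · exact Or.inl (by omega)
        · exact Or.inl h1
        · exact Or.inl h2
        · exact Or.inr ⟨rfl, ih h1 h2⟩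

theorem pvLexLt_asymm {c d : List Int} (h : pvLexLt c d = true) : pvLexLt d c = false := by
  cases hdc : pvLexLt d c with
  | false => rfl
  | true => exact absurd (pvLexLt_trans h hdc) (by simp [pvLexLt_irrefl])

theorem pvKeyLt_irrefl (c : List Int) : ¬ pvKeyLt c c := by
  simp [pvKeyLt, pvKeyLtb, pvLexLt_irrefl]
theorem pvKeyLt_trans {c d e : List Int} (h1 : pvKeyLt c d) (h2 : pvKeyLt d e) : pvKeyLt c e := by
  simp only [pvKeyLt, pvKeyLtb, Bool.or_eq_true, Bool.and_eq_true, decide_eq_true_eq,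
    beq_iff_eq] at h1 h2 ⊢
  rcases h1 with h1 | ⟨e1, h1⟩ <;> rcases h2 with h2 | ⟨e2, h2⟩
  · exact Or.inl (by omega)
  · exact Or.inl (by omega)
  · exact Or.inl (by omega)
  · exact Or.inr ⟨by omega, pvLexLt_trans h1 h2⟩
theorem pvKeyLt_trichot (c d : List Int) : pvKeyLt c d ∨ c = d ∨ pvKeyLt d c := by
  rcases Nat.lt_trichotomy c.length d.length with h | h | h
  · exact Or.inl (by simp [pvKeyLt, pvKeyLtb, h])
  · rcases pvLexLt_trichot c d with h2 | h2 | h2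
    · exact Or.inl (by simp [pvKeyLt, pvKeyLtb, h, h2])
    · exact Or.inr (Or.inl h2)
    · exact Or.inr (Or.inr (by simp [pvKeyLt, pvKeyLtb, h.symm, h2]))
  · exact Or.inr (Or.inr (by simp [pvKeyLt, pvKeyLtb, h]))
theorem pvKeyLe_trans {c d e : List Int} (h1 : pvKeyLe c d) (h2 : pvKeyLe d e) : pvKeyLe c e := by
  rcases h1 with h1 | rfl
  · rcases h2 with h2 | rfl
    · exact Or.inl (pvKeyLt_trans h1 h2)
    · exact Or.inl h1
  · exact h2
theorem pvKeyLe_antisymm {c d : List Int} (h1 : pvKeyLe c d) (h2 : pvKeyLe d c) : c = d := by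
  rcases h1 with h1 | rfl
  · rcases h2 with h2 | rfl
    · exact absurd (pvKeyLt_trans h1 h2) (pvKeyLt_irrefl c)
    · rfl
  · rfl
theorem pvKeyLe_of_not_lt {c d : List Int} (h : ¬ pvKeyLt c d) : pvKeyLe d c := by
  rcases pvKeyLt_trichot c d with h1 | rfl | h1
  · exact absurd h1 h
  · exact Or.inr rfl
  · exact Or.inl h1
theorem pvKeyLe_len {c d : List Int} (h : pvKeyLe c d) : c.length ≤ d.length := by
  rcases h with h | rfl
  · simp only [pvKeyLt, pvKeyLtb, Bool.or_eq_true, Bool.and_eq_true, decide_eq_true_eq,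
      beq_iff_eq] at h
    rcases h with h | ⟨h, _⟩ <;> omega
  · exact le_refl _
theorem pvKeyLt_of_lt_length {c d : List Int} (h : c.length < d.length) : pvKeyLt c d := by
  simp [pvKeyLt, pvKeyLtb, h]

-- ---------- pvIns lemmas ----------
theorem pvIns_perm (s : Int) (c : List Int) : (pvIns s c).Perm (s :: c) :=
  List.perm_orderedInsert _ s c
theorem pvIns_length (s : Int) (c : List Int) : (pvIns s c).length = c.length + 1 :=
  List.orderedInsert_length _ c s
theorem pvIns_sum (s : Int) (c : List Int) : (pvIns s c).sum = s + c.sum := by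
  have := (pvIns_perm s c).sum_eq
  simpa using this
theorem pvIns_mem {x s : Int} {c : List Int} : x ∈ pvIns s c ↔ x = s ∨ x ∈ c := by
  have := (pvIns_perm s c).mem_iff (a := x)
  simpa using this
theorem pvIns_sorted {s : Int} {c : List Int} (h : List.Pairwise (· ≤ ·) c) :
    List.Pairwise (· ≤ ·) (pvIns s c) :=
  List.Pairwise.orderedInsert s c h
theorem pvIns_head (s : Int) (c : List Int) :
    ∃ a l, pvIns s c = a :: l ∧ a ≤ s := by
  cases c with
  | nil => exact ⟨s, [], rfl, le_refl s⟩
  | cons b bs =>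
    by_cases hb : s ≤ b
    · exact ⟨s, b :: bs, by simp [pvIns, List.orderedInsert, hb], le_refl s⟩
    · exact ⟨b, List.orderedInsert (· ≤ ·) s bs,
        by simp [pvIns, List.orderedInsert, hb], by omega⟩
theorem pvIns_lex_mono {s : Int} {c d : List Int} (hlen : c.length = d.length)
    (h : pvLexLt c d = true) : pvLexLt (pvIns s c) (pvIns s d) = true := by
  induction c generalizing d with
  | nil =>
    cases d with
    | nil => simp [pvLexLt] at h
    | cons b bs => simp at hlen
  | cons a as ih =>
    cases d with
    | nil => simp [pvLexLt] at h
    | cons b bs =>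
      simp only [List.length_cons] at hlen
      simp only [pvLexLt, Bool.or_eq_true, Bool.and_eq_true, decide_eq_true_eq,
        beq_iff_eq] at h
      rcases h with h | ⟨rfl, h⟩
      · by_cases h1 : s ≤ a
        · have h2 : s ≤ b := by omega
          simp [pvIns, List.orderedInsert, h1, h2, pvLexLt, h]
        · by_cases h2 : s ≤ b
          · simp [pvIns, List.orderedInsert, h1, h2, pvLexLt]
            omega
          · simp [pvIns, List.orderedInsert, h1, h2, pvLexLt, h]
      · by_cases h1 : s ≤ a
        · simp [pvIns, List.orderedInsert, h1, pvLexLt, h]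
        · have ihr := ih (d := bs) (by omega) h
          simp only [pvIns, List.orderedInsert, if_neg h1]
          simp [pvLexLt]
          exact ihr
theorem pvIns_key_mono {s : Int} {c d : List Int} (h : pvKeyLe c d) :
    pvKeyLe (pvIns s c) (pvIns s d) := by
  rcases h with h | rfl
  · simp only [pvKeyLt, pvKeyLtb, Bool.or_eq_true, Bool.and_eq_true, decide_eq_true_eq,
      beq_iff_eq] at h
    rcases h with h | ⟨hlen, h⟩
    · exact Or.inl (pvKeyLt_of_lt_length (by rw [pvIns_length, pvIns_length]; omega))
    · exact Or.inl (by
        simp only [pvKeyLt, pvKeyLtb, Bool.or_eq_true, Bool.and_eq_true, decide_eq_true_eq,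
          beq_iff_eq]
        exact Or.inr ⟨by rw [pvIns_length, pvIns_length]; omega, pvIns_lex_mono hlen h⟩)
  · exact Or.inr rfl
theorem pvIns_erase {s : Int} {c : List Int} (hs : List.Pairwise (· ≤ ·) c) (hmem : s ∈ c) :
    pvIns s (c.erase s) = c := by
  induction c with
  | nil => simp at hmem
  | cons a as ih =>
    by_cases ha : s = a
    · subst ha
      rw [List.erase_cons_head]
      cases as with
      | nil => rfl
      | cons b bs =>
        have hsb : s ≤ b := (List.rel_of_pairwise_cons hs) (by simp)
        simp [pvIns, List.orderedInsert, hsb]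
    · have hmem' : s ∈ as := by
        rcases List.mem_cons.mp hmem with h | h
        · exact absurd h ha
        · exact h
      have has : a ≤ s := (List.rel_of_pairwise_cons hs) hmem'
      rw [List.erase_cons_tail (by simp; exact fun h => ha h.symm)]
      have hlt : ¬ s ≤ a := by
        rcases lt_or_eq_of_le has with h | h
        · omega
        · exact absurd h.symm ha
      simp only [pvIns, List.orderedInsert, if_neg hlt]
      have := ih (List.Pairwise.of_cons hs) hmem'
      simp only [pvIns] at this
      rw [this]

-- ---------- pvRep lemmas ----------
theorem pvRep_erase {S : List Int} {t : Nat} {c : List Int} {s : Nat}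
    (hS : ∀ x ∈ S, 2 ≤ x) (hr : pvRep S t c) (hmem : (s : Int) ∈ c) :
    s ≤ t ∧ pvRep S (t - s) (c.erase (s : Int)) := by
  obtain ⟨hsort, hmemS, hsum⟩ := hr
  have hperm := List.perm_cons_erase hmem
  have hsum2 : c.sum = (s : Int) + (c.erase (s : Int)).sum := by
    have := hperm.sum_eq; simpa using this
  have hnn : 0 ≤ (c.erase (s : Int)).sum := by
    apply List.sum_nonneg
    intro x hx
    have := hS x (hmemS x (List.mem_of_mem_erase hx))
    omega
  have hst : s ≤ t := by omega
  refine ⟨hst, List.Pairwise.sublist (List.erase_sublist) hsort, fun x hx => hmemS x (List.mem_of_mem_erase hx), ?_⟩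
  have hc2 : ((t - s : Nat) : Int) = (t : Int) - (s : Int) := by omega
  rw [hc2]
  omega
theorem pvRep_ins {S : List Int} {t : Nat} {c : List Int} {s : Nat}
    (hr : pvRep S (t - s) c) (hmem : (s : Int) ∈ S) (hst : s ≤ t) :
    pvRep S t (pvIns (s : Int) c) := by
  obtain ⟨hsort, hmemS, hsum⟩ := hr
  refine ⟨pvIns_sorted hsort, ?_, ?_⟩
  · intro x hx
    rcases pvIns_mem.mp hx with rfl | hx
    · exact hmem
    · exact hmemS x hx
  · rw [pvIns_sum, hsum]
    have : ((t - s : Nat) : Int) = (t : Int) - (s : Int) := by omega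
    rw [this]
    omega
theorem pvRep_len {S : List Int} {t : Nat} {c : List Int}
    (hS : ∀ x ∈ S, 2 ≤ x) (hr : pvRep S t c) : 2 * c.length ≤ t := by
  obtain ⟨_, hmemS, hsum⟩ := hr
  have key : ∀ (l : List Int), (∀ x ∈ l, 2 ≤ x) → 2 * (l.length : Int) ≤ l.sum := by
    intro l
    induction l with
    | nil => simp
    | cons a as ih =>
      intro hl
      have h1 := hl a (by simp)
      have h2 := ih (fun x hx => hl x (by simp [hx]))
      simp only [List.length_cons, List.sum_cons]
      push_cast
      omega
  have := key c (fun x hx => hS x (hmemS x hx))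
  rw [hsum] at this
  omega
theorem pvRep_mono {S S' : List Int} {t : Nat} {c : List Int}
    (hss : ∀ x ∈ S, x ∈ S') (hr : pvRep S t c) : pvRep S' t c :=
  ⟨hr.1, fun x hx => hss x (hr.2.1 x hx), hr.2.2⟩

-- ---------- A-side: the staged DP computes the best combo ----------
theorem pvIsBest_unique {S : List Int} {t : Nat} {o1 o2 : Option (List Int)}
    (h1 : pvIsBest S t o1) (h2 : pvIsBest S t o2) : o1 = o2 := by
  cases o1 with
  | none =>
    cases o2 with
    | none => rfl
    | some c => exact absurd h2.1 (h1 c)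
  | some c =>
    cases o2 with
    | none => exact absurd h1.1 (h2 c)
    | some d => exact congrArg some (pvKeyLe_antisymm (h1.2 d h2.1) (h2.2 c h1.1))

theorem pvStage_lt {s : Nat} {h : Nat → Option (List Int)} {t : Nat} (ht : t < s) :
    pvStage s h t = h t := by
  rw [pvStage]
  simp [ht]
theorem pvStage_ge {s : Nat} {h : Nat → Option (List Int)} {t : Nat} (hs : 0 < s) (ht : s ≤ t) :
    pvStage s h t =
      match pvStage s h (t - s) with
      | none => h t
      | some p => pvChoose (h t) (pvIns (s : Int) p) := by
  rw [pvStage]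
  have : ¬ (t < s ∨ s = 0) := by omega
  simp [this]

theorem pvStage_isBest {s : Nat} (hs : 2 ≤ s) {S : List Int} (hS : ∀ x ∈ S, 2 ≤ x)
    {h : Nat → Option (List Int)} (H : ∀ t, pvIsBest S t (h t)) :
    ∀ t, pvIsBest (S ++ [(s : Int)]) t (pvStage s h t) := by
  have hS' : ∀ x ∈ S ++ [(s : Int)], 2 ≤ x := by
    intro x hx
    rcases List.mem_append.mp hx with hx | hx
    · exact hS x hx
    · simp at hx; subst hx; exact_mod_cast Int.ofNat_le.mpr hs
  intro t
  induction t using Nat.strong_induction_on with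
  | _ t ih =>
  have avoid : ∀ d, pvRep (S ++ [(s : Int)]) t d → (s : Int) ∉ d → pvRep S t d := by
    intro d hd hsd
    refine ⟨hd.1, ?_, hd.2.2⟩
    intro x hx
    rcases List.mem_append.mp (hd.2.1 x hx) with h1 | h1
    · exact h1
    · simp at h1; subst h1; exact absurd hx hsd
  have lift : ∀ d, pvRep S t d → pvRep (S ++ [(s : Int)]) t d :=
    fun d => pvRep_mono (fun x hx => List.mem_append.mpr (Or.inl hx))
  by_cases hts : t < s
  · rw [pvStage_lt hts]
    have hnos : ∀ c, pvRep (S ++ [(s : Int)]) t c → pvRep S t c := by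
      intro c hc
      by_cases hsc : (s : Int) ∈ c
      · obtain ⟨hle, _⟩ := pvRep_erase hS' hc hsc
        omega
      · exact avoid c hc hsc
    cases hh : h t with
    | none =>
      have Hb := H t; rw [hh] at Hb
      intro c hc
      exact Hb c (hnos c hc)
    | some o =>
      have Hb := H t; rw [hh] at Hb
      exact ⟨lift o Hb.1, fun d hd => Hb.2 d (hnos d hd)⟩
  · have hst : s ≤ t := by omega
    rw [pvStage_ge (by omega) hst]
    have ihb := ih (t - s) (by omega)
    rcases hb : pvStage s h (t - s) with _ | p
    · rw [hb] at ihb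
      have hnos : ∀ c, pvRep (S ++ [(s : Int)]) t c → pvRep S t c := by
        intro c hc
        by_cases hsc : (s : Int) ∈ c
        · obtain ⟨_, hrep⟩ := pvRep_erase hS' hc hsc
          exact absurd hrep (ihb _)
        · exact avoid c hc hsc
      cases hh : h t with
      | none =>
        have Hb := H t; rw [hh] at Hb
        intro c hc
        exact Hb c (hnos c hc)
      | some o =>
        have Hb := H t; rw [hh] at Hb
        exact ⟨lift o Hb.1, fun d hd => Hb.2 d (hnos d hd)⟩
    · rw [hb] at ihb
      have hsmem : (s : Int) ∈ S ++ [(s : Int)] := by simp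
      have hcand : pvRep (S ++ [(s : Int)]) t (pvIns (s : Int) p) := pvRep_ins ihb.1 hsmem hst
      have hcandmin : ∀ d, pvRep (S ++ [(s : Int)]) t d → (s : Int) ∈ d →
          pvKeyLe (pvIns (s : Int) p) d := by
        intro d hd hsd
        obtain ⟨_, hrep⟩ := pvRep_erase hS' hd hsd
        have h2 := pvIns_key_mono (s := (s : Int)) (ihb.2 _ hrep)
        rw [pvIns_erase hd.1 hsd] at h2
        exact h2
      cases hh : h t with
      | none =>
        have Hb := H t; rw [hh] at Hb
        show pvIsBest _ t (some (pvIns (s : Int) p))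
        refine ⟨hcand, fun d hd => ?_⟩
        by_cases hsd : (s : Int) ∈ d
        · exact hcandmin d hd hsd
        · exact absurd (avoid d hd hsd) (Hb d)
      | some o =>
        have Hb := H t; rw [hh] at Hb
        have ho := lift o Hb.1
        show pvIsBest _ t (pvChoose (some o) (pvIns (s : Int) p))
        have hcheq : pvChoose (some o) (pvIns (s : Int) p) =
            if pvKeyLtb (pvIns (s : Int) p) o then some (pvIns (s : Int) p) else some o := rfl
        rw [hcheq]
        by_cases hlt : pvKeyLtb (pvIns (s : Int) p) o = true
        · rw [if_pos hlt]
          refine ⟨hcand, fun d hd => ?_⟩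
          by_cases hsd : (s : Int) ∈ d
          · exact hcandmin d hd hsd
          · exact pvKeyLe_trans (Or.inl hlt) (Hb.2 d (avoid d hd hsd))
        · rw [if_neg hlt]
          refine ⟨ho, fun d hd => ?_⟩
          by_cases hsd : (s : Int) ∈ d
          · exact pvKeyLe_trans (pvKeyLe_of_not_lt hlt) (hcandmin d hd hsd)
          · exact Hb.2 d (avoid d hd hsd)

theorem pvBase_isBest : ∀ t, pvIsBest [] t (pvBase t) := by
  intro t
  by_cases ht : t = 0
  · subst ht
    show pvIsBest [] 0 (some [])
    refine ⟨⟨List.Pairwise.nil, by simp, by simp⟩, fun d hd => ?_⟩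
    have hd0 : d = [] := by
      cases d with
      | nil => rfl
      | cons a as => exact absurd (hd.2.1 a (by simp)) (by simp)
    subst hd0
    exact Or.inr rfl
  · simp only [pvBase, if_neg ht]
    intro c hc
    have hc0 : c = [] := by
      cases c with
      | nil => rfl
      | cons a as => exact absurd (hc.2.1 a (by simp)) (by simp)
    subst hc0
    have := hc.2.2
    simp at this
    omega
theorem pvG5_isBest : ∀ t, pvIsBest pvAllS t (pvG5 t) := by
  have h1 := pvStage_isBest (s := 2) (by omega) (S := []) (by simp) pvBase_isBest
  have h2 := pvStage_isBest (s := 3) (by omega) (S := [(2 : Int)]) (by decide) h1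
  have h3 := pvStage_isBest (s := 6) (by omega) (S := [(2 : Int), 3]) (by decide) h2
  have h4 := pvStage_isBest (s := 7) (by omega) (S := [(2 : Int), 3, 6]) (by decide) h3
  have h5 := pvStage_isBest (s := 8) (by omega) (S := [(2 : Int), 3, 6, 7]) (by decide) h4
  exact h5

-- ---------- B-side: min count and greedy reconstruction ----------
def pvCoinsN : List Nat := [2, 3, 6, 7, 8]

def pvFoldC (t : Nat) (l : List Nat) (acc : Option Nat) : Option Nat :=
  l.foldl (fun acc s => pvCombine acc (if s ≤ t then pvCnt (t - s) else none)) acc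

-- n is a play count reachable from acc or via one of the coins in l
def pvCand (t : Nat) (l : List Nat) (acc : Option Nat) (n : Nat) : Prop :=
  acc = some n ∨ ∃ s ∈ l, s ≤ t ∧ ∃ m, pvCnt (t - s) = some m ∧ n = m + 1

theorem pvCombine_some_inv {acc X : Option Nat} {n : Nat} (h : pvCombine acc X = some n) :
    acc = some n ∨ ∃ m, X = some m ∧ n = m + 1 := by
  cases X with
  | none => exact Or.inl h
  | some m =>
    cases acc with
    | none =>
      simp only [pvCombine, Option.some.injEq] at h
      exact Or.inr ⟨m, rfl, h.symm⟩
    | some b =>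
      simp only [pvCombine] at h
      split at h
      · exact Or.inr ⟨m, rfl, (Option.some.injEq _ _ ▸ h).symm⟩
      · exact Or.inl h

theorem pvCombine_le_acc {acc X : Option Nat} {n : Nat} (h : acc = some n) :
    ∃ n', pvCombine acc X = some n' ∧ n' ≤ n := by
  subst h
  cases X with
  | none => exact ⟨n, rfl, le_refl n⟩
  | some m =>
    simp only [pvCombine]
    split
    · exact ⟨m + 1, rfl, by omega⟩
    · exact ⟨n, rfl, le_refl n⟩

theorem pvCombine_le_X {acc X : Option Nat} {m : Nat} (h : X = some m) :
    ∃ n', pvCombine acc X = some n' ∧ n' ≤ m + 1 := by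
  subst h
  cases acc with
  | none => exact ⟨m + 1, rfl, le_refl _⟩
  | some b =>
    simp only [pvCombine]
    split
    · exact ⟨m + 1, rfl, le_refl _⟩
    · exact ⟨b, rfl, by omega⟩

theorem pvFoldC_spec (t : Nat) : ∀ (l : List Nat) (acc : Option Nat),
    (pvFoldC t l acc = none → ∀ n, ¬ pvCand t l acc n) ∧
    (∀ n, pvFoldC t l acc = some n → pvCand t l acc n ∧ ∀ m, pvCand t l acc m → n ≤ m) := by
  intro l
  induction l with
  | nil =>
    intro acc
    constructor
    · intro hnone n hc
      rcases hc with hc | ⟨s, hs, _⟩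
      · rw [show pvFoldC t [] acc = acc from rfl] at hnone
        rw [hnone] at hc
        simp at hc
      · simp at hs
    · intro n hsome
      rw [show pvFoldC t [] acc = acc from rfl] at hsome
      refine ⟨Or.inl hsome, ?_⟩
      intro m hm
      rcases hm with hm | ⟨s, hs, _⟩
      · rw [hsome] at hm
        simp at hm
        omega
      · simp at hs
  | cons s l ih =>
    intro acc
    have hfold : pvFoldC t (s :: l) acc =
        pvFoldC t l (pvCombine acc (if s ≤ t then pvCnt (t - s) else none)) := rfl
    set X := (if s ≤ t then pvCnt (t - s) else none) with hX
    -- (b): candidates of the combined accumulator are candidates of (s :: l, acc)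
    have dirb : ∀ n, pvCand t l (pvCombine acc X) n → pvCand t (s :: l) acc n := by
      intro n hc
      rcases hc with hc | ⟨s', hs', h1, m, h2, h3⟩
      · rcases pvCombine_some_inv hc with h | ⟨m, hm, rfl⟩
        · exact Or.inl h
        · rw [hX] at hm
          by_cases hst : s ≤ t
          · rw [if_pos hst] at hm
            exact Or.inr ⟨s, by simp, hst, m, hm, rfl⟩
          · rw [if_neg hst] at hm; simp at hm
      · exact Or.inr ⟨s', by simp [hs'], h1, m, h2, h3⟩
    -- (a): every candidate of (s :: l, acc) dominates some candidate of the combined acc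
    have dira : ∀ n, pvCand t (s :: l) acc n →
        ∃ n', pvCand t l (pvCombine acc X) n' ∧ n' ≤ n := by
      intro n hc
      rcases hc with hc | ⟨s', hs', h1, m, h2, h3⟩
      · obtain ⟨n', hn', hle⟩ := pvCombine_le_acc (X := X) hc
        exact ⟨n', Or.inl hn', hle⟩
      · rcases List.mem_cons.mp hs' with rfl | hs'
        · have hXm : X = some m := by rw [hX, if_pos h1]; exact h2
          obtain ⟨n', hn', hle⟩ := pvCombine_le_X (acc := acc) hXm
          exact ⟨n', Or.inl hn', by omega⟩
        · exact ⟨n, Or.inr ⟨s', hs', h1, m, h2, h3⟩, le_refl n⟩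
    rw [hfold]
    obtain ⟨ihn, ihs⟩ := ih (pvCombine acc X)
    constructor
    · intro hnone n hc
      obtain ⟨n', hn', _⟩ := dira n hc
      exact ihn hnone n' hn'
    · intro n hsome
      obtain ⟨hcand, hmin⟩ := ihs n hsome
      refine ⟨dirb n hcand, ?_⟩
      intro m hm
      obtain ⟨n', hn', hle⟩ := dira m hm
      have := hmin n' hn'
      omega

theorem pvCnt_unfold {t : Nat} (ht : t ≠ 0) : pvCnt t = pvFoldC t pvCoinsN none := by
  rw [pvCnt, if_neg ht]
  rfl

theorem pvAllS_elim {x : Int} (hx : x ∈ pvAllS) :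
    ∃ sN, sN ∈ pvCoinsN ∧ x = (sN : Int) ∧ 2 ≤ sN := by
  fin_cases hx
  · exact ⟨2, by decide, rfl, by omega⟩
  · exact ⟨3, by decide, rfl, by omega⟩
  · exact ⟨6, by decide, rfl, by omega⟩
  · exact ⟨7, by decide, rfl, by omega⟩
  · exact ⟨8, by decide, rfl, by omega⟩

theorem pvAllS_ge2 : ∀ x ∈ pvAllS, (2 : Int) ≤ x := by decide

theorem pvCoinsN_ge2 {s : Nat} (h : s ∈ pvCoinsN) : 2 ≤ s := by
  simp [pvCoinsN] at h
  rcases h with rfl | rfl | rfl | rfl | rfl <;> omega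

theorem pvCoinsN_cast {s : Nat} (h : s ∈ pvCoinsN) : (s : Int) ∈ pvAllS := by
  simp [pvCoinsN] at h
  rcases h with rfl | rfl | rfl | rfl | rfl <;> decide

theorem pvCnt_eq_g5 : ∀ t, pvCnt t = (pvG5 t).map List.length := by
  intro t
  induction t using Nat.strong_induction_on with
  | _ t ih =>
  by_cases ht : t = 0
  · subst ht
    have hbest : pvIsBest pvAllS 0 (some []) := by
      refine ⟨⟨List.Pairwise.nil, by simp, by simp⟩, fun d hd => ?_⟩
      cases d with
      | nil => exact Or.inr rfl
      | cons a as => exact Or.inl (pvKeyLt_of_lt_length (by simp))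
    rw [pvIsBest_unique (pvG5_isBest 0) hbest]
    rw [pvCnt]
    rfl
  · rw [pvCnt_unfold ht]
    obtain ⟨specn, specs⟩ := pvFoldC_spec t pvCoinsN none
    cases hg : pvG5 t with
    | none =>
      have hno := pvG5_isBest t
      rw [hg] at hno
      cases hfold : pvFoldC t pvCoinsN none with
      | none => rfl
      | some n =>
        obtain ⟨hcand, _⟩ := specs n hfold
        rcases hcand with hc | ⟨s, hsl, hst, m, hm, rfl⟩
        · simp at hc
        · have ihm := ih (t - s) (by have := pvCoinsN_ge2 hsl; omega)
          rw [ihm] at hm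
          cases he : pvG5 (t - s) with
          | none => rw [he] at hm; simp at hm
          | some e =>
            have hbe := pvG5_isBest (t - s)
            rw [he] at hbe
            have := pvRep_ins (t := t) hbe.1 (pvCoinsN_cast hsl) hst
            exact absurd this (hno _)
    | some c =>
      have hbest := pvG5_isBest t
      rw [hg] at hbest
      -- c is nonempty since t ≠ 0
      obtain ⟨a, rest, rfl⟩ : ∃ a rest, c = a :: rest := by
        cases c with
        | nil =>
          exfalso
          have := hbest.1.2.2
          simp at this
          omega
        | cons a rest => exact ⟨a, rest, rfl⟩
      obtain ⟨aN, haN, rfl, ha2⟩ := pvAllS_elim (hbest.1.2.1 a (by simp))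
      obtain ⟨hat, hrest⟩ := pvRep_erase (s := aN) pvAllS_ge2 hbest.1 (by simp)
      rw [List.erase_cons_head] at hrest
      have hs2 : 2 ≤ aN := ha2
      have ihm := ih (t - aN) (by omega)
      cases hd : pvG5 (t - aN) with
      | none =>
        have hno := pvG5_isBest (t - aN)
        rw [hd] at hno
        exact absurd hrest (hno _)
      | some d =>
        have hbd := pvG5_isBest (t - aN)
        rw [hd] at hbd
        have hdle : d.length ≤ rest.length := pvKeyLe_len (hbd.2 _ hrest)
        -- the head coin provides a candidate of size d.length + 1
        have hcand0 : pvCand t pvCoinsN none (d.length + 1) := by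
          refine Or.inr ⟨aN, haN, hat, d.length, ?_, rfl⟩
          rw [ihm, hd]
          rfl
        cases hfold : pvFoldC t pvCoinsN none with
        | none => exact absurd hcand0 (specn hfold _)
        | some n =>
          obtain ⟨hcand, hmin⟩ := specs n hfold
          -- n ≤ d.length + 1 ≤ rest.length + 1 = c.length
          have hub : n ≤ rest.length + 1 := le_trans (hmin _ hcand0) (by omega)
          -- every candidate is ≥ c.length
          have hlow : rest.length + 1 ≤ n := by
            rcases hcand with hc | ⟨s, hsl, hst, m, hm, rfl⟩
            · simp at hc
            · have ihs := ih (t - s) (by have := pvCoinsN_ge2 hsl; omega)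
              rw [ihs] at hm
              cases he : pvG5 (t - s) with
              | none => rw [he] at hm; simp at hm
              | some e =>
                have hbe := pvG5_isBest (t - s)
                rw [he] at hbe
                have hrepi := pvRep_ins (t := t) hbe.1 (pvCoinsN_cast hsl) hst
                have := pvKeyLe_len (hbest.2 _ hrepi)
                rw [pvIns_length] at this
                rw [he] at hm
                simp only [Option.map_some, Option.some.injEq] at hm
                simp only [List.length_cons] at this
                omega
          have : n = rest.length + 1 := by omega
          subst this
          simp
theorem pvLexLt_cons_cons (a : Int) (x y : List Int) :
    pvLexLt (a :: x) (a :: y) = pvLexLt x y := by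
  simp [pvLexLt]

theorem pvKeyLt_of_head_lt {x y : Int} {xs ys : List Int}
    (hlen : (x :: xs).length = (y :: ys).length) (hxy : x < y) : pvKeyLt (x :: xs) (y :: ys) := by
  simp only [pvKeyLt, pvKeyLtb, Bool.or_eq_true, Bool.and_eq_true, decide_eq_true_eq, beq_iff_eq]
  exact Or.inr ⟨hlen, by simp [pvLexLt, hxy]⟩

theorem pvKeyLe_lt_absurd {c d : List Int} (h1 : pvKeyLe c d) (h2 : pvKeyLt d c) : False := by
  rcases h1 with h1 | rfl
  · exact pvKeyLt_irrefl c (pvKeyLt_trans h1 h2)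
  · exact pvKeyLt_irrefl c h2

theorem pvFind_first {p : Nat → Bool} : ∀ {l : List Nat}, l.Pairwise (· < ·) → ∀ {a : Nat},
    a ∈ l → p a = true → (∀ s ∈ l, s < a → p s = false) → l.find? p = some a := by
  intro l
  induction l with
  | nil => intro _ a ha; simp at ha
  | cons b bs ih =>
    intro hl a ha hpa hless
    rcases List.mem_cons.mp ha with rfl | ha'
    · rw [List.find?_cons_of_pos hpa]
    · have hba : b < a := (List.rel_of_pairwise_cons hl) ha'
      rw [List.find?_cons_of_neg (by simp [hless b (by simp) hba])]
      exact ih (List.Pairwise.of_cons hl) ha' hpa (fun s hs h => hless s (by simp [hs]) h)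

theorem pvCoinsN_pairwise : (pvCoinsN : List Nat).Pairwise (· < ·) := by decide

theorem pvGreedyF_correct : ∀ n t c, pvG5 t = some c → c.length = n → pvGreedyF n t = c := by
  intro n
  induction n with
  | zero =>
    intro t c hg hlen
    have hc : c = [] := by
      cases c with
      | nil => rfl
      | cons a as => simp at hlen
    subst hc
    rfl
  | succ k ih =>
    intro t c hg hlen
    have hbest := pvG5_isBest t
    rw [hg] at hbest
    obtain ⟨a, rest, rfl⟩ : ∃ a rest, c = a :: rest := by
      cases c with
      | nil => simp at hlen
      | cons a rest => exact ⟨a, rest, rfl⟩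
    obtain ⟨aN, haN, rfl, ha2⟩ := pvAllS_elim (hbest.1.2.1 a (by simp))
    obtain ⟨hat, hrest⟩ := pvRep_erase (s := aN) pvAllS_ge2 hbest.1 (by simp)
    rw [List.erase_cons_head] at hrest
    have hlen' : rest.length = k := by simpa using hlen
    have hbd' := pvG5_isBest (t - aN)
    cases hd : pvG5 (t - aN) with
    | none =>
      rw [hd] at hbd'
      exact absurd hrest (hbd' _)
    | some d =>
      rw [hd] at hbd'
      have hinsrep := pvRep_ins (t := t) hbd'.1 (pvCoinsN_cast haN) hat
      have hdlen : d.length = k := by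
        have h1 : d.length ≤ rest.length := pvKeyLe_len (hbd'.2 _ hrest)
        have h2 := pvKeyLe_len (hbest.2 _ hinsrep)
        rw [pvIns_length] at h2
        simp only [List.length_cons] at h2
        omega
      have hinsd : pvIns (aN : Int) d = (aN : Int) :: d := by
        cases d with
        | nil => rfl
        | cons b bs =>
          by_cases hb : (aN : Int) ≤ b
          · simp [pvIns, List.orderedInsert, hb]
          · exfalso
            have heq : pvIns (aN : Int) (b :: bs) =
                b :: List.orderedInsert (· ≤ ·) (aN : Int) bs := by
              simp [pvIns, List.orderedInsert, hb]
            have hlt : pvKeyLt (pvIns (aN : Int) (b :: bs)) ((aN : Int) :: rest) := by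
              rw [heq]
              apply pvKeyLt_of_head_lt
              · have h1 := pvIns_length (aN : Int) (b :: bs)
                rw [heq] at h1
                simp only [List.length_cons] at h1 ⊢
                simp only [List.length_cons] at hdlen
                omega
              · omega
            exact pvKeyLe_lt_absurd (hbest.2 _ hinsrep) hlt
      have hrd : rest = d := by
        have h1 : pvKeyLe ((aN : Int) :: rest) ((aN : Int) :: d) := by
          have := hbest.2 _ hinsrep
          rwa [hinsd] at this
        have h2 : pvKeyLe d rest := hbd'.2 _ hrest
        rcases h1 with h1 | h1
        · rcases h2 with h2 | h2
          · exfalso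
            simp only [pvKeyLt, pvKeyLtb, Bool.or_eq_true, Bool.and_eq_true, decide_eq_true_eq,
              beq_iff_eq] at h1 h2
            rcases h1 with h1 | ⟨_, h1⟩
            · simp only [List.length_cons] at h1; omega
            · rcases h2 with h2 | ⟨_, h2⟩
              · omega
              · rw [pvLexLt_cons_cons] at h1
                exact absurd h1 (by simp [pvLexLt_asymm h2])
          · exact h2.symm
        · injection h1
      have hpred : (fun s => decide (s ≤ t) && (pvCnt (t - s) == some k)) aN = true := by
        simp only [Bool.and_eq_true, decide_eq_true_eq, beq_iff_eq]
        refine ⟨hat, ?_⟩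
        rw [pvCnt_eq_g5, hd]
        simp [hdlen]
      have hprev : ∀ s ∈ pvCoinsN, s < aN →
          (fun s => decide (s ≤ t) && (pvCnt (t - s) == some k)) s = false := by
        intro s hsl hslt
        by_contra hcon
        simp only [Bool.and_eq_true, decide_eq_true_eq, beq_iff_eq, Bool.not_eq_false] at hcon
        obtain ⟨hst, hcnt⟩ := hcon
        rw [pvCnt_eq_g5] at hcnt
        cases he : pvG5 (t - s) with
        | none => rw [he] at hcnt; simp at hcnt
        | some e =>
          rw [he] at hcnt
          simp only [Option.map_some, Option.some.injEq] at hcnt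
          have hbe := pvG5_isBest (t - s)
          rw [he] at hbe
          have hrepi := pvRep_ins (t := t) hbe.1 (pvCoinsN_cast hsl) hst
          obtain ⟨hd0, tl, heq, hle⟩ := pvIns_head (s : Int) e
          have hlt : pvKeyLt (pvIns (s : Int) e) ((aN : Int) :: rest) := by
            rw [heq]
            apply pvKeyLt_of_head_lt
            · have h1 := pvIns_length (s : Int) e
              rw [heq] at h1
              simp only [List.length_cons] at h1 ⊢
              omega
            · have hcast : (s : Int) < (aN : Int) := by exact_mod_cast hslt
              omega
          exact pvKeyLe_lt_absurd (hbest.2 _ hrepi) hlt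
      have hfind := pvFind_first pvCoinsN_pairwise haN hpred hprev
      rw [show pvGreedyF (k + 1) t =
          (match List.find? (fun s => decide (s ≤ t) && (pvCnt (t - s) == some k)) [2, 3, 6, 7, 8] with
          | none => []
          | some s => (s : Int) :: pvGreedyF k (t - s)) from rfl]
      rw [show ([2, 3, 6, 7, 8] : List Nat) = pvCoinsN from rfl, hfind]
      show ((aN : Int) :: pvGreedyF k (t - aN) : List Int) = (aN : Int) :: rest
      rw [ih (t - aN) d hd hdlen, hrd]

-- ---------- bridge: port A computes pvG5 ----------
def pvEnc : Option (List Int) → Int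
  | none => pvINF
  | some c => (c.length : Int)

def pvArrN (f : Nat → Option (List Int)) (N : Nat) : List Int :=
  (List.range N).map (fun i => pvEnc (f i))

def pvArrC (f : Nat → Option (List Int)) (N : Nat) : List (Option (List Int)) :=
  (List.range N).map f

-- the table state in the middle of coin s's pass: indices < m already updated
def pvMix (s : Nat) (h : Nat → Option (List Int)) (m : Nat) : Nat → Option (List Int) :=
  fun i => if i < m then pvStage s h i else h i

theorem pvArrN_get (f : Nat → Option (List Int)) (N : Nat) {k : Nat} (hk : k < N) (d : Int) :
    PySem.List.pyGetD (pvArrN f N) ((k : Nat) : Int) d = pvEnc (f k) := by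
  rw [PySem.List.pyGetD_natCast]
  exact PySem.List.getD_map_range _ _ _ _ hk

theorem pvArrC_get (f : Nat → Option (List Int)) (N : Nat) {k : Nat} (hk : k < N)
    (d : Option (List Int)) :
    PySem.List.pyGetD (pvArrC f N) ((k : Nat) : Int) d = f k := by
  rw [PySem.List.pyGetD_natCast]
  exact PySem.List.getD_map_range _ _ _ _ hk

theorem pvArrN_congr {f g : Nat → Option (List Int)} {N : Nat}
    (h : ∀ i, i < N → pvEnc (f i) = pvEnc (g i)) : pvArrN f N = pvArrN g N := by
  unfold pvArrN
  exact List.map_congr_left (fun i hi => h i (List.mem_range.mp hi))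

theorem pvArrC_congr {f g : Nat → Option (List Int)} {N : Nat}
    (h : ∀ i, i < N → f i = g i) : pvArrC f N = pvArrC g N := by
  unfold pvArrC
  exact List.map_congr_left (fun i hi => h i (List.mem_range.mp hi))

theorem pvArrN_set {f g : Nat → Option (List Int)} {N m : Nat} (_hm : m < N)
    (hcong : ∀ i, i < N → i ≠ m → pvEnc (f i) = pvEnc (g i)) {v : Int}
    (hv : v = pvEnc (g m)) : (pvArrN f N).set m v = pvArrN g N := by
  apply List.ext_getElem
  · simp [pvArrN]
  · intro i h1 h2
    have hiN : i < N := by simpa [pvArrN] using h2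
    rw [List.getElem_set]
    simp only [pvArrN, List.getElem_map, List.getElem_range]
    by_cases him : m = i
    · subst him
      rw [if_pos rfl, hv]
    · rw [if_neg him]
      exact hcong i hiN (fun hh => him hh.symm)

theorem pvArrC_set {f g : Nat → Option (List Int)} {N m : Nat} (_hm : m < N)
    (hcong : ∀ i, i < N → i ≠ m → f i = g i) {v : Option (List Int)}
    (hv : v = g m) : (pvArrC f N).set m v = pvArrC g N := by
  apply List.ext_getElem
  · simp [pvArrC]
  · intro i h1 h2
    have hiN : i < N := by simpa [pvArrC] using h2
    rw [List.getElem_set]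
    simp only [pvArrC, List.getElem_map, List.getElem_range]
    by_cases him : m = i
    · subst him
      rw [if_pos rfl, hv]
    · rw [if_neg him]
      exact hcong i hiN (fun hh => him hh.symm)

theorem pvBodyA_step (s : Nat) (hs : 2 ≤ s) (S : List Int) (hS : ∀ x ∈ S, 2 ≤ x)
    (h : Nat → Option (List Int)) (H : ∀ t, pvIsBest S t (h t))
    (HG : ∀ t, pvIsBest (S ++ [(s : Int)]) t (pvStage s h t))
    (N m : Nat) (hsm : s ≤ m) (hmN : m < N) (hN : (N : Int) ≤ 2 * 10 ^ 9) :
    pvBodyA ((s : Nat) : Int) (pvArrN (pvMix s h m) N, pvArrC (pvMix s h m) N) ((m : Nat) : Int)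
      = (pvArrN (pvMix s h (m + 1)) N, pvArrC (pvMix s h (m + 1)) N) := by
  have hS' : ∀ x ∈ S ++ [(s : Int)], 2 ≤ x := by
    intro x hx
    rcases List.mem_append.mp hx with hx | hx
    · exact hS x hx
    · simp at hx; subst hx; exact_mod_cast Int.ofNat_le.mpr hs
  have hidx : ((m : Nat) : Int) - ((s : Nat) : Int) = ((m - s : Nat) : Int) := by omega
  have hms : m - s < m := by omega
  have hmsN : m - s < N := by omega
  have hmix_ms : pvMix s h m (m - s) = pvStage s h (m - s) := if_pos hms
  have hmix_m : pvMix s h m m = h m := if_neg (lt_irrefl m)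
  have hstage_m := pvStage_ge (h := h) (by omega : 0 < s) hsm
  have hcong : ∀ i, i < N → i ≠ m → pvMix s h m i = pvMix s h (m + 1) i := by
    intro i _ hne
    unfold pvMix
    by_cases hi : i < m
    · rw [if_pos hi, if_pos (by omega)]
    · rw [if_neg hi, if_neg (by omega)]
  have hcongN : ∀ i, i < N → i ≠ m → pvEnc (pvMix s h m i) = pvEnc (pvMix s h (m + 1) i) :=
    fun i hi hne => by rw [hcong i hi hne]
  have hm1 : pvMix s h (m + 1) m = pvStage s h m := if_pos (by omega)
  have hunch : pvStage s h m = h m →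
      (pvArrN (pvMix s h m) N, pvArrC (pvMix s h m) N)
        = (pvArrN (pvMix s h (m + 1)) N, pvArrC (pvMix s h (m + 1)) N) := by
    intro hsm2
    have harr : ∀ i, i < N → pvMix s h m i = pvMix s h (m + 1) i := by
      intro i hi
      by_cases hne : i = m
      · subst hne; rw [hmix_m, hm1, hsm2]
      · exact hcong i hi hne
    rw [pvArrN_congr (fun i hi => by rw [harr i hi]), pvArrC_congr harr]
  show (have dpNum := (pvArrN (pvMix s h m) N, pvArrC (pvMix s h m) N).1;
    have dpCombo := (pvArrN (pvMix s h m) N, pvArrC (pvMix s h m) N).2;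
    have v := PySem.List.pyGetD dpNum (((m : Nat) : Int) - ((s : Nat) : Int)) 0;
    if v ≥ pvINF then (pvArrN (pvMix s h m) N, pvArrC (pvMix s h m) N)
    else
      have candNum := v + 1
      match PySem.List.pyGetD dpCombo (((m : Nat) : Int) - ((s : Nat) : Int)) none with
      | none => (pvArrN (pvMix s h m) N, pvArrC (pvMix s h m) N)
      | some prev =>
        have candCombo := List.orderedInsert (· ≤ ·) ((s : Nat) : Int) prev
        have curNum := PySem.List.pyGetD dpNum ((m : Nat) : Int) 0
        if candNum < curNum then
          (PySem.List.pySetD dpNum ((m : Nat) : Int) candNum,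
           PySem.List.pySetD dpCombo ((m : Nat) : Int) (some candCombo))
        else if candNum == curNum then
          match PySem.List.pyGetD dpCombo ((m : Nat) : Int) none with
          | none => (dpNum, PySem.List.pySetD dpCombo ((m : Nat) : Int) (some candCombo))
          | some cur =>
            if pvLexLt candCombo cur then
              (dpNum, PySem.List.pySetD dpCombo ((m : Nat) : Int) (some candCombo))
            else (pvArrN (pvMix s h m) N, pvArrC (pvMix s h m) N)
        else (pvArrN (pvMix s h m) N, pvArrC (pvMix s h m) N))
      = (pvArrN (pvMix s h (m + 1)) N, pvArrC (pvMix s h (m + 1)) N)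
  simp only [ge_iff_le]
  rw [hidx, pvArrN_get _ _ hmsN, hmix_ms]
  cases hb : pvStage s h (m - s) with
  | none =>
    rw [if_pos (by show pvEnc none ≥ pvINF; simp [pvEnc])]
    exact hunch (by rw [hstage_m, hb])
  | some p =>
    have hrepp := (HG (m - s))
    rw [hb] at hrepp
    have hlenp : 2 * p.length ≤ m - s := pvRep_len hS' hrepp.1
    have hbound : ¬ (pvEnc (some p) ≥ pvINF) := by
      simp only [pvEnc, pvINF]
      omega
    rw [if_neg hbound]
    rw [pvArrC_get _ _ hmsN, hmix_ms, hb]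
    show (if pvEnc (some p) + 1 < PySem.List.pyGetD (pvArrN (pvMix s h m) N) ((m : Nat) : Int) 0 then
        (PySem.List.pySetD (pvArrN (pvMix s h m) N) ((m : Nat) : Int) (pvEnc (some p) + 1),
          PySem.List.pySetD (pvArrC (pvMix s h m) N) ((m : Nat) : Int)
            (some (pvIns ((s : Nat) : Int) p)))
      else
        if pvEnc (some p) + 1 == PySem.List.pyGetD (pvArrN (pvMix s h m) N) ((m : Nat) : Int) 0 then
          match PySem.List.pyGetD (pvArrC (pvMix s h m) N) ((m : Nat) : Int) none with
          | none =>
            (pvArrN (pvMix s h m) N,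
              PySem.List.pySetD (pvArrC (pvMix s h m) N) ((m : Nat) : Int)
                (some (pvIns ((s : Nat) : Int) p)))
          | some cur =>
            if pvLexLt (pvIns ((s : Nat) : Int) p) cur then
              (pvArrN (pvMix s h m) N,
                PySem.List.pySetD (pvArrC (pvMix s h m) N) ((m : Nat) : Int)
                  (some (pvIns ((s : Nat) : Int) p)))
            else (pvArrN (pvMix s h m) N, pvArrC (pvMix s h m) N)
        else (pvArrN (pvMix s h m) N, pvArrC (pvMix s h m) N))
      = (pvArrN (pvMix s h (m + 1)) N, pvArrC (pvMix s h (m + 1)) N)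
    rw [pvArrN_get _ _ hmN, hmix_m]
    have hstage_some : pvStage s h m = pvChoose (h m) (pvIns ((s : Nat) : Int) p) := by
      rw [hstage_m, hb]
    cases hh : h m with
    | none =>
      have hltI : pvEnc (some p) + 1 < pvEnc none := by
        simp only [pvEnc, pvINF]
        omega
      rw [if_pos hltI]
      have hval : pvStage s h m = some (pvIns ((s : Nat) : Int) p) := by
        rw [hstage_some, hh]; rfl
      rw [PySem.List.pySetD_natCast, PySem.List.pySetD_natCast,
          pvArrN_set hmN hcongN (hv := by
            rw [hm1, hval]
            simp [pvEnc, pvIns_length]),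
          pvArrC_set hmN hcong (hv := by rw [hm1, hval])]
    | some o =>
      have hrepo := H m
      rw [hh] at hrepo
      by_cases hlt : pvEnc (some p) + 1 < pvEnc (some o)
      · have hlt' : p.length + 1 < o.length := by
          simp only [pvEnc] at hlt
          omega
        have hkey : pvKeyLtb (pvIns ((s : Nat) : Int) p) o = true := by
          simp only [pvKeyLtb, Bool.or_eq_true, Bool.and_eq_true, decide_eq_true_eq,
            beq_iff_eq, pvIns_length]
          exact Or.inl (by omega)
        have hval : pvStage s h m = some (pvIns ((s : Nat) : Int) p) := by
          rw [hstage_some, hh]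
          simp [pvChoose, hkey]
        rw [if_pos hlt, PySem.List.pySetD_natCast, PySem.List.pySetD_natCast,
            pvArrN_set hmN hcongN (hv := by
              rw [hm1, hval]
              simp [pvEnc, pvIns_length]),
            pvArrC_set hmN hcong (hv := by rw [hm1, hval])]
      · rw [if_neg hlt]
        by_cases heq : p.length + 1 = o.length
        · rw [if_pos (by simp only [pvEnc, beq_iff_eq]; omega)]
          rw [pvArrC_get _ _ hmN, hmix_m, hh]
          simp only []
          by_cases hlex : pvLexLt (pvIns ((s : Nat) : Int) p) o = true
          · rw [if_pos hlex]
            have hkey : pvKeyLtb (pvIns ((s : Nat) : Int) p) o = true := by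
              simp only [pvKeyLtb, Bool.or_eq_true, Bool.and_eq_true, decide_eq_true_eq,
                beq_iff_eq, pvIns_length]
              exact Or.inr ⟨by omega, hlex⟩
            have hval : pvStage s h m = some (pvIns ((s : Nat) : Int) p) := by
              rw [hstage_some, hh]
              simp [pvChoose, hkey]
            have harrN : pvArrN (pvMix s h m) N = pvArrN (pvMix s h (m + 1)) N :=
              pvArrN_congr (fun i hi => by
                by_cases hne : i = m
                · subst hne
                  rw [hmix_m, hh, hm1, hval]
                  simp only [pvEnc, pvIns_length]
                  omega
                · exact hcongN i hi hne)
            rw [PySem.List.pySetD_natCast, harrN,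
                pvArrC_set hmN hcong (hv := by rw [hm1, hval])]
          · rw [if_neg hlex]
            have hkey : pvKeyLtb (pvIns ((s : Nat) : Int) p) o = false := by
              simp only [pvKeyLtb, Bool.or_eq_false_iff, Bool.and_eq_false_iff,
                decide_eq_false_iff_not, pvIns_length]
              constructor
              · omega
              · right
                simpa using hlex
            exact hunch (by
              rw [hstage_some, hh]
              simp [pvChoose, hkey])
        · rw [if_neg (by simp only [pvEnc, beq_iff_eq]; omega)]
          have hkey : pvKeyLtb (pvIns ((s : Nat) : Int) p) o = false := by
            simp only [pvEnc] at hlt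
            simp only [pvKeyLtb, Bool.or_eq_false_iff, Bool.and_eq_false_iff,
              decide_eq_false_iff_not, pvIns_length]
            constructor
            · omega
            · left
              simp only [beq_eq_false_iff_ne, ne_eq]
              omega
          exact hunch (by
            rw [hstage_some, hh]
            simp [pvChoose, hkey])

theorem pvStageArr (s : Nat) (hs : 2 ≤ s) (S : List Int) (hS : ∀ x ∈ S, 2 ≤ x)
    (h : Nat → Option (List Int)) (H : ∀ t, pvIsBest S t (h t))
    (N : Nat) (hN : (N : Int) ≤ 2 * 10 ^ 9) :
    (PySem.List.pyRange ((s : Nat) : Int) ((N : Nat) : Int) 1).foldl (pvBodyA ((s : Nat) : Int))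
        (pvArrN h N, pvArrC h N)
      = (pvArrN (pvStage s h) N, pvArrC (pvStage s h) N) := by
  have HG := pvStage_isBest hs hS H
  have hstart : ∀ i, i < N → h i = pvMix s h s i := by
    intro i _
    unfold pvMix
    by_cases hi : i < s
    · rw [if_pos hi, pvStage_lt hi]
    · rw [if_neg hi]
  have hfin : ∀ (M : Nat), N ≤ M → ∀ i, i < N → pvMix s h M i = pvStage s h i := by
    intro M hM i hi
    exact if_pos (by omega)
  by_cases hsN : N ≤ s
  · rw [PySem.List.pyRange_one_eq_nil (by exact_mod_cast hsN)]
    simp only [List.foldl_nil]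
    have he : ∀ i, i < N → h i = pvStage s h i := by
      intro i hi
      rw [pvStage_lt (by omega)]
    rw [pvArrN_congr (fun i hi => by rw [he i hi]), pvArrC_congr he]
  · have hsN' : s ≤ N := by omega
    have main : ∀ j : Nat, s + j ≤ N →
        (PySem.List.pyRange ((s : Nat) : Int) (((s + j : Nat)) : Int) 1).foldl
            (pvBodyA ((s : Nat) : Int)) (pvArrN (pvMix s h s) N, pvArrC (pvMix s h s) N)
          = (pvArrN (pvMix s h (s + j)) N, pvArrC (pvMix s h (s + j)) N) := by
      intro j
      induction j with
      | zero =>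
        intro _
        rw [PySem.List.pyRange_one_eq_nil (by omega)]
        rfl
      | succ j ih =>
        intro hj
        have hsplit : PySem.List.pyRange ((s : Nat) : Int) (((s + (j + 1) : Nat)) : Int) 1 =
            PySem.List.pyRange ((s : Nat) : Int) (((s + j : Nat)) : Int) 1
              ++ [((s + j : Nat) : Int)] := by
          rw [show (((s + (j + 1) : Nat)) : Int) = ((s + j : Nat) : Int) + 1 from by push_cast; ring]
          exact PySem.List.pyRange_one_succ_right (by omega)
        rw [hsplit, List.foldl_append, ih (by omega)]
        simp only [List.foldl_cons, List.foldl_nil]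
        have := pvBodyA_step s hs S hS h H HG N (s + j) (by omega) (by omega) hN
        rw [this]
        rfl
    have hend := main (N - s) (by omega)
    rw [show s + (N - s) = N from by omega] at hend
    rw [pvArrN_congr (fun i hi => by rw [hstart i hi]), pvArrC_congr hstart, hend,
        pvArrN_congr (fun i hi => by rw [hfin N (le_refl N) i hi]),
        pvArrC_congr (fun i hi => by rw [hfin N (le_refl N) i hi])]

theorem pvInitN (N : Nat) (_hN : 1 ≤ N) :
    PySem.List.pySetD (List.replicate N pvINF) 0 (0 : Int) = pvArrN pvBase N := by
  rw [show (0 : Int) = ((0 : Nat) : Int) from rfl, PySem.List.pySetD_natCast]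
  apply List.ext_getElem
  · simp [pvArrN]
  · intro i h1 h2
    have hiN : i < N := by simpa [pvArrN] using h2
    rw [List.getElem_set]
    simp only [pvArrN, List.getElem_map, List.getElem_range, List.getElem_replicate]
    by_cases hi : (0 : Nat) = i
    · subst hi
      rw [if_pos rfl]
      simp [pvBase, pvEnc]
    · rw [if_neg hi]
      simp only [pvBase, pvEnc]
      rw [if_neg (by omega)]

theorem pvInitC (N : Nat) (_hN : 1 ≤ N) :
    PySem.List.pySetD (List.replicate N (none : Option (List Int))) 0 (some ([] : List Int))
      = pvArrC pvBase N := by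
  rw [show (0 : Int) = ((0 : Nat) : Int) from rfl, PySem.List.pySetD_natCast]
  apply List.ext_getElem
  · simp [pvArrC]
  · intro i h1 h2
    have hiN : i < N := by simpa [pvArrC] using h2
    rw [List.getElem_set]
    simp only [pvArrC, List.getElem_map, List.getElem_range, List.getElem_replicate]
    by_cases hi : (0 : Nat) = i
    · subst hi
      rw [if_pos rfl]
      simp [pvBase]
    · rw [if_neg hi]
      simp only [pvBase]
      rw [if_neg (by omega)]

theorem portA_eq (total : Int) (h0 : 0 ≤ total) (h2 : total < 2 * 10 ^ 9) :
    find_min_combo total = pvG5 total.toNat := by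
  obtain ⟨T, rfl⟩ : ∃ T : Nat, total = ((T : Nat) : Int) := ⟨total.toNat, by omega⟩
  rw [Int.toNat_natCast]
  have hN2 : ((T + 1 : Nat) : Int) ≤ 2 * 10 ^ 9 := by omega
  have H0 := pvBase_isBest
  have H1 := pvStage_isBest (s := 2) (by omega) (S := []) (by simp) H0
  have H2 := pvStage_isBest (s := 3) (by omega) (S := [(2 : Int)]) (by decide) H1
  have H3 := pvStage_isBest (s := 6) (by omega) (S := [(2 : Int), 3]) (by decide) H2
  have H4 := pvStage_isBest (s := 7) (by omega) (S := [(2 : Int), 3, 6]) (by decide) H3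
  have hA1 := pvStageArr 2 (by omega) [] (by simp) pvBase H0 (T + 1) hN2
  have hA2 := pvStageArr 3 (by omega) [(2 : Int)] (by decide) _ H1 (T + 1) hN2
  have hA3 := pvStageArr 6 (by omega) [(2 : Int), 3] (by decide) _ H2 (T + 1) hN2
  have hA4 := pvStageArr 7 (by omega) [(2 : Int), 3, 6] (by decide) _ H3 (T + 1) hN2
  have hA5 := pvStageArr 8 (by omega) [(2 : Int), 3, 6, 7] (by decide) _ H4 (T + 1) hN2
  have hsorted : PySem.List.sorted ([2, 3, 6, 7, 8] : List Int) (fun x => x) false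
      = [2, 3, 6, 7, 8] := by decide
  have htoN : (((T + 1 : Nat) : Int)).toNat = T + 1 := by omega
  have hup : ((T : Nat) : Int) + 1 = ((T + 1 : Nat) : Int) := by push_cast; ring
  unfold find_min_combo
  simp only [hsorted, hup, htoN, List.foldl_cons, List.foldl_nil]
  rw [pvInitN (T + 1) (by omega), pvInitC (T + 1) (by omega)]
  rw [show (2 : Int) = ((2 : Nat) : Int) from rfl]
  rw [hA1]
  rw [show (3 : Int) = ((3 : Nat) : Int) from rfl]
  rw [hA2]
  rw [show (6 : Int) = ((6 : Nat) : Int) from rfl]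
  rw [hA3]
  rw [show (7 : Int) = ((7 : Nat) : Int) from rfl]
  rw [hA4]
  rw [show (8 : Int) = ((8 : Nat) : Int) from rfl]
  rw [hA5]
  rw [show pvStage 8 (pvStage 7 (pvStage 6 (pvStage 3 (pvStage 2 pvBase)))) = pvG5 from rfl]
  have hTlt : T < T + 1 := by omega
  rw [pvArrN_get pvG5 (T + 1) hTlt 0, pvArrC_get pvG5 (T + 1) hTlt none]
  cases hg : pvG5 T with
  | none =>
    rw [if_pos (by simp [pvEnc])]
  | some c =>
    have hbest := pvG5_isBest T
    rw [hg] at hbest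
    have hlen := pvRep_len pvAllS_ge2 hbest.1
    rw [if_neg (by simp only [pvEnc, pvINF]; omega)]

-- ---------- bridge: port B computes pvG5 ----------
def pvCastN : Nat → Int := fun n => (n : Int)

def pvDictInv (cnt : PySem.Dict Int Int) (m : Nat) : Prop :=
  ∀ k : Int, PySem.Dict.get? cnt k =
    if 0 ≤ k ∧ k ≤ (m : Int) then Option.map pvCastN (pvCnt k.toNat) else none

theorem pvDictInv_zero : pvDictInv (PySem.Dict.ofList [(0, 0)]) 0 := by
  intro k
  rw [show PySem.Dict.ofList [((0 : Int), (0 : Int))] =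
      PySem.Dict.insert PySem.Dict.empty 0 0 from rfl]
  rw [PySem.Dict.get?_insert]
  by_cases hk : k = 0
  · subst hk
    rw [if_pos rfl, if_pos (by omega)]
    rw [show ((0 : Int)).toNat = 0 from rfl]
    rw [show pvCnt 0 = some 0 from by rw [pvCnt]; rfl]
    rfl
  · rw [if_neg hk, PySem.Dict.get?_empty, if_neg (by omega)]

theorem pvBestStep_eq (cnt : PySem.Dict Int Int) (m : Nat) (hinv : pvDictInv cnt m)
    (s : Nat) (hs : 1 ≤ s) (acc : Option Nat) :
    pvBestStep cnt ((m + 1 : Nat) : Int) (Option.map pvCastN acc) ((s : Nat) : Int)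
      = Option.map pvCastN (pvCombine acc (if s ≤ m + 1 then pvCnt (m + 1 - s) else none)) := by
  by_cases hst : s ≤ m + 1
  · have hidx : ((m + 1 : Nat) : Int) - ((s : Nat) : Int) = ((m + 1 - s : Nat) : Int) := by omega
    have hget := hinv ((m + 1 - s : Nat) : Int)
    have hcond : (0 ≤ ((m + 1 - s : Nat) : Int) ∧ ((m + 1 - s : Nat) : Int) ≤ (m : Int)) := by omega
    rw [if_pos hcond] at hget
    have htoNat : (((m + 1 - s : Nat) : Int)).toNat = m + 1 - s := by omega
    rw [htoNat] at hget
    rw [if_pos hst]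
    cases hc : pvCnt (m + 1 - s) with
    | none =>
      rw [hc] at hget
      unfold pvBestStep
      rw [hidx]
      have hcont : PySem.Dict.contains cnt ((m + 1 - s : Nat) : Int) = false := by
        rw [PySem.Dict.contains_eq_isSome_get?, hget]
        rfl
      simp [hcont, pvCombine]
    | some mv =>
      rw [hc] at hget
      unfold pvBestStep
      rw [hidx]
      have hcont : PySem.Dict.contains cnt ((m + 1 - s : Nat) : Int) = true := by
        rw [PySem.Dict.contains_eq_isSome_get?, hget]
        rfl
      have hgetD : PySem.Dict.getD cnt ((m + 1 - s : Nat) : Int) 0 = pvCastN mv := by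
        rw [PySem.Dict.getD_eq_get?_getD, hget]
        rfl
      rw [if_pos (by simp [hcont]; omega)]
      rw [hgetD]
      cases acc with
      | none => simp [pvCombine, pvCastN]
      | some b =>
        simp only [Option.map_some, pvCombine]
        by_cases hb : mv + 1 < b
        · rw [if_pos (by simp [pvCastN]; omega), if_pos hb]
          simp [pvCastN]
        · rw [if_neg (by simp [pvCastN]; omega), if_neg hb]
          rfl
  · rw [if_neg hst]
    unfold pvBestStep
    rw [if_neg (by simp; omega)]
    simp [pvCombine]

theorem pvBestFold_eq (cnt : PySem.Dict Int Int) (m : Nat) (hinv : pvDictInv cnt m) :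
    ∀ (l : List Nat), (∀ s ∈ l, 1 ≤ s) → ∀ (acc : Option Nat),
    (l.map pvCastN).foldl (pvBestStep cnt ((m + 1 : Nat) : Int)) (Option.map pvCastN acc)
      = Option.map pvCastN (pvFoldC (m + 1) l acc) := by
  intro l
  induction l with
  | nil => intro _ acc; rfl
  | cons s ls ih =>
    intro hl acc
    have hstep := pvBestStep_eq cnt m hinv s (by have := hl s (by simp); omega) acc
    calc ((s :: ls).map pvCastN).foldl (pvBestStep cnt ((m + 1 : Nat) : Int)) (Option.map pvCastN acc)
        = (ls.map pvCastN).foldl (pvBestStep cnt ((m + 1 : Nat) : Int))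
            (Option.map pvCastN (pvCombine acc (if s ≤ m + 1 then pvCnt (m + 1 - s) else none))) := by
          simp only [List.map_cons, List.foldl_cons]
          rw [show pvCastN s = ((s : Nat) : Int) from rfl, hstep]
      _ = Option.map pvCastN (pvFoldC (m + 1) ls
            (pvCombine acc (if s ≤ m + 1 then pvCnt (m + 1 - s) else none))) :=
          ih (fun x hx => hl x (by simp [hx])) _
      _ = Option.map pvCastN (pvFoldC (m + 1) (s :: ls) acc) := rfl

-- B's per-total loop body
def pvStepB (cnt : PySem.Dict Int Int) (t : Int) : PySem.Dict Int Int :=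
  match ([2, 3, 6, 7, 8] : List Int).foldl (pvBestStep cnt t) none with
  | none => cnt
  | some b => PySem.Dict.insert cnt t b

theorem pvStepB_inv (cnt : PySem.Dict Int Int) (m : Nat) (hinv : pvDictInv cnt m) :
    pvDictInv (pvStepB cnt ((m + 1 : Nat) : Int)) (m + 1) := by
  have hfold := pvBestFold_eq cnt m hinv pvCoinsN (by decide) none
  have hlist : ([2, 3, 6, 7, 8] : List Int) = pvCoinsN.map pvCastN := by decide
  have hcnt : pvCnt (m + 1) = pvFoldC (m + 1) pvCoinsN none := pvCnt_unfold (by omega)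
  unfold pvStepB
  rw [hlist]
  rw [show (none : Option Int) = Option.map pvCastN none from rfl, hfold, ← hcnt]
  cases hc : pvCnt (m + 1) with
  | none =>
    intro k
    show cnt.get? k = if 0 ≤ k ∧ k ≤ ((m + 1 : Nat) : Int) then
      Option.map pvCastN (pvCnt k.toNat) else none
    rw [hinv k]
    by_cases hk : k = ((m + 1 : Nat) : Int)
    · subst hk
      rw [if_neg (by omega), if_pos (by omega)]
      rw [show (((m + 1 : Nat) : Int)).toNat = m + 1 from by omega, hc]
      rfl
    · by_cases h1 : 0 ≤ k ∧ k ≤ (m : Int)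
      · rw [if_pos h1, if_pos (by omega)]
      · rw [if_neg h1, if_neg (by omega)]
  | some b =>
    intro k
    show (cnt.insert ((m + 1 : Nat) : Int) (pvCastN b)).get? k = if 0 ≤ k ∧ k ≤ ((m + 1 : Nat) : Int) then
      Option.map pvCastN (pvCnt k.toNat) else none
    rw [PySem.Dict.get?_insert]
    by_cases hk : k = ((m + 1 : Nat) : Int)
    · subst hk
      rw [if_pos rfl, if_pos (by omega)]
      rw [show (((m + 1 : Nat) : Int)).toNat = m + 1 from by omega, hc]
      rfl
    · rw [if_neg hk, hinv k]
      by_cases h1 : 0 ≤ k ∧ k ≤ (m : Int)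
      · rw [if_pos h1, if_pos (by omega)]
      · rw [if_neg h1, if_neg (by omega)]

theorem pvLoopB_inv : ∀ (m : Nat),
    pvDictInv ((PySem.List.pyRange 1 ((m : Nat) + 1 : Int) 1).foldl
      (fun cnt t => pvStepB cnt t) (PySem.Dict.ofList [(0, 0)])) m := by
  intro m
  induction m with
  | zero =>
    rw [PySem.List.pyRange_one_eq_nil (by omega)]
    exact pvDictInv_zero
  | succ m ih =>
    have hsplit : PySem.List.pyRange 1 ((m + 1 : Nat) + 1 : Int) 1 =
        PySem.List.pyRange 1 ((m : Nat) + 1 : Int) 1 ++ [((m : Nat) + 1 : Int)] := by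
      have := PySem.List.pyRange_one_succ_right (a := 1) (b := ((m : Nat) + 1 : Int)) (by omega)
      rw [show ((m + 1 : Nat) + 1 : Int) = ((m : Nat) + 1) + 1 from by push_cast; ring]
      exact this
    rw [hsplit, List.foldl_append]
    simp only [List.foldl_cons, List.foldl_nil]
    have := pvStepB_inv _ m ih
    rw [show (((m + 1 : Nat)) : Int) = (m : Nat) + 1 from by push_cast; ring] at this
    exact this

theorem pvFind_cast {p : Int → Bool} {q : Nat → Bool} :
    ∀ (l : List Nat), (∀ s ∈ l, p ((s : Nat) : Int) = q s) →
    List.find? p (l.map pvCastN) = Option.map pvCastN (List.find? q l) := by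
  intro l
  induction l with
  | nil => intro _; rfl
  | cons s ls ih =>
    intro hp
    simp only [List.map_cons, List.find?]
    rw [show pvCastN s = ((s : Nat) : Int) from rfl, hp s (by simp)]
    cases hq : q s with
    | true => rfl
    | false => exact ih (fun x hx => hp x (by simp [hx]))

theorem pvGreedy_eq (cnt : PySem.Dict Int Int) (T : Nat) (hinv : pvDictInv cnt T) :
    ∀ (k : Nat) (tN : Nat), tN ≤ T →
    pvGreedy cnt k ((tN : Nat) : Int) ((k : Nat) : Int) = pvGreedyF k tN := by
  intro k
  induction k with
  | zero => intro tN _; rfl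
  | succ k ih =>
    intro tN htT
    have hpred : ∀ s ∈ pvCoinsN,
        (fun s : Int => decide (s ≤ ((tN : Nat) : Int)) &&
          (PySem.Dict.get? cnt (((tN : Nat) : Int) - s) == some ((((k + 1 : Nat) : Int)) - 1)))
            ((s : Nat) : Int)
        = (fun s : Nat => decide (s ≤ tN) && (pvCnt (tN - s) == some k)) s := by
      intro s hsl
      have hs1 : 1 ≤ s := by have := pvCoinsN_ge2 hsl; omega
      by_cases hst : s ≤ tN
      · have hidx : ((tN : Nat) : Int) - ((s : Nat) : Int) = ((tN - s : Nat) : Int) := by omega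
        have hget := hinv ((tN - s : Nat) : Int)
        rw [if_pos (by omega)] at hget
        rw [show (((tN - s : Nat) : Int)).toNat = tN - s from by omega] at hget
        simp only [hidx, hget]
        rw [show ((((k + 1 : Nat) : Int)) - 1) = ((k : Nat) : Int) from by push_cast; ring]
        cases hc : pvCnt (tN - s) with
        | none => simp [hst]
        | some mv =>
          have h1 : ((s : Nat) : Int) ≤ ((tN : Nat) : Int) := by exact_mod_cast hst
          simp [h1, hst, pvCastN, Nat.cast_inj]
      · have h1 : ¬ ((s : Nat) : Int) ≤ ((tN : Nat) : Int) := by exact_mod_cast hst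
        show (decide (((s : Nat) : Int) ≤ ((tN : Nat) : Int)) &&
            (PySem.Dict.get? cnt (((tN : Nat) : Int) - ((s : Nat) : Int)) ==
              some ((((k + 1 : Nat) : Int)) - 1)))
          = (decide (s ≤ tN) && (pvCnt (tN - s) == some k))
        simp [h1, hst]
    have hlist : ([2, 3, 6, 7, 8] : List Int) = pvCoinsN.map pvCastN := by decide
    rw [show pvGreedy cnt (k + 1) ((tN : Nat) : Int) (((k + 1 : Nat)) : Int) =
        (match List.find? (fun s : Int => decide (s ≤ ((tN : Nat) : Int)) &&
            (PySem.Dict.get? cnt (((tN : Nat) : Int) - s) == some ((((k + 1 : Nat) : Int)) - 1)))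
            ([2, 3, 6, 7, 8] : List Int) with
        | none => []
        | some s => s :: pvGreedy cnt k (((tN : Nat) : Int) - s) ((((k + 1 : Nat) : Int)) - 1))
        from rfl]
    rw [hlist, pvFind_cast pvCoinsN hpred]
    rw [show pvGreedyF (k + 1) tN =
        (match List.find? (fun s => decide (s ≤ tN) && (pvCnt (tN - s) == some k)) pvCoinsN with
        | none => []
        | some s => (s : Int) :: pvGreedyF k (tN - s)) from rfl]
    cases hf : List.find? (fun s => decide (s ≤ tN) && (pvCnt (tN - s) == some k)) pvCoinsN with
    | none => rfl
    | some s =>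
      simp only [Option.map_some]
      have hps := List.find?_some hf
      have hstN : s ≤ tN := by
        simp only [Bool.and_eq_true, decide_eq_true_eq] at hps
        exact hps.1
      show pvCastN s :: pvGreedy cnt k (((tN : Nat) : Int) - pvCastN s) ((((k + 1 : Nat) : Int)) - 1)
          = (s : Int) :: pvGreedyF k (tN - s)
      rw [show ((tN : Nat) : Int) - pvCastN s = ((tN - s : Nat) : Int) from by
        simp only [pvCastN]; omega]
      rw [show ((((k + 1 : Nat) : Int)) - 1) = ((k : Nat) : Int) from by push_cast; ring]
      rw [ih (tN - s) (by omega)]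
      rfl

theorem portB_eq (total : Int) (h0 : 0 ≤ total) :
    find_min_combo_alt total = pvG5 total.toNat := by
  obtain ⟨T, rfl⟩ : ∃ T : Nat, total = ((T : Nat) : Int) := ⟨total.toNat, by omega⟩
  rw [Int.toNat_natCast]
  have hinv := pvLoopB_inv T
  have hget := hinv ((T : Nat) : Int)
  rw [if_pos (by omega), show (((T : Nat) : Int)).toNat = T from by omega] at hget
  rw [show find_min_combo_alt ((T : Nat) : Int) =
      (match (List.foldl (fun cnt t => pvStepB cnt t) (PySem.Dict.ofList [(0, 0)])
          (PySem.List.pyRange 1 (((T : Nat) : Int) + 1) 1)).get? ((T : Nat) : Int) with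
      | none => none
      | some n => some (pvGreedy (List.foldl (fun cnt t => pvStepB cnt t)
          (PySem.Dict.ofList [(0, 0)]) (PySem.List.pyRange 1 (((T : Nat) : Int) + 1) 1))
          n.toNat ((T : Nat) : Int) n)) from rfl]
  rw [hget, pvCnt_eq_g5]
  cases hg : pvG5 T with
  | none => rfl
  | some c =>
    show some (pvGreedy _ ((pvCastN c.length)).toNat ((T : Nat) : Int) (pvCastN c.length)) = some c
    rw [show ((pvCastN c.length)).toNat = c.length from by simp [pvCastN]]
    rw [show pvCastN c.length = ((c.length : Nat) : Int) from rfl]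
    rw [pvGreedy_eq _ T hinv c.length T (le_refl T)]
    rw [pvGreedyF_correct c.length T c hg rfl]

-- ===== VERDICT (by name: the statement is the Claim_ definition above) =====
theorem find_min_combo_spec : Claim_equal_find_min_combo := by
  intro total _ hpre
  unfold Spec_find_min_combo
  rw [portA_eq total hpre.1 hpre.2, portB_eq total hpre.1]
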